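-- pv_equiv track=rewrite | github.com/se7enzc/ROSALIND | 04.FIB.py | rabbit_total
-- ===== SOURCE A (Python) =====
-- def rabbit_total(month,ratio):
--     if month == 1 :
--         rabbits = 1 #第一个月的时候只有一对幼年兔子
--     elif month == 2:
--         rabbits = 1 #第二个月的时候只有一对成年兔子
--     else:
--         rabbits = rabbit_total(month-1,ratio) + rabbit_total(month-2,ratio) * ratio
--     return rabbits
-- ===== SOURCE B (Python) =====
-- def rabbit_total(month, ratio):
--     a, b = 1, 1
--     for _ in range(month - 2):
--         a, b = b, b + a * ratio
--     return b
-- ===== Notes on version B (the rewrite author's own statement) =====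
-- stated objective: faster
-- what changed: Replaces the naive exponential double recursion by a bottom-up iterative loop keeping only the last two values; intended as faster (measured 22.86x at the largest size both finished, A times out beyond that, so a timing run could not confirm the label).
import Mathlib
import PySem

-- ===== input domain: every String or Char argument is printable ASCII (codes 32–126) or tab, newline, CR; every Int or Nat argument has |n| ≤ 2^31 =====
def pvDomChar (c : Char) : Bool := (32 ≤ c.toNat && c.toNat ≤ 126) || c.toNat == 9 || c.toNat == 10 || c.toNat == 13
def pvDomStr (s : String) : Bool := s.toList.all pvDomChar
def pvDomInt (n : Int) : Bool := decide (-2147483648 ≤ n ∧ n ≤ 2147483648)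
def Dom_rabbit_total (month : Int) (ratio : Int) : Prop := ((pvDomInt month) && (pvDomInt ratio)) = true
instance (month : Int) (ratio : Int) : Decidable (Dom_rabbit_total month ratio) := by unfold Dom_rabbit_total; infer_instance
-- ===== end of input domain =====

-- B replaces A's exponential double recursion by a bottom-up loop keeping the last two values (intended as faster; measured 22.86x at the largest size both finished).

-- ===== PORT A =====
-- A recurses on month; for month ≤ 0 Python never terminates (RecursionError), so those
-- inputs are outside Pre_. The Nat recursion below mirrors A's three branches exactly;
-- the value at 0 is never reached under Pre_rabbit_total.
def rabbitRecA : Nat → Int → Int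
  | 0, _ => 0
  | 1, _ => 1
  | 2, _ => 1
  | (n+3), r => rabbitRecA (n+2) r + rabbitRecA (n+1) r * r

def rabbit_total (month : Int) (ratio : Int) : Int := rabbitRecA month.toNat ratio

-- ===== PORT B =====
def rabbit_total_alt (month : Int) (ratio : Int) : Int :=
  ((PySem.List.pyRange 0 (month - 2) 1).foldl
    (fun (ab : Int × Int) _ => (ab.2, ab.2 + ab.1 * ratio)) (1, 1)).2

-- ===== PRECONDITION & SPEC =====
-- Pre_ excludes month ≤ 0, on which A's recursion never bottoms out (RecursionError in Python).
def Pre_rabbit_total (month : Int) (ratio : Int) : Prop := 1 ≤ month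
instance (month : Int) (ratio : Int) : Decidable (Pre_rabbit_total month ratio) := by unfold Pre_rabbit_total; infer_instance
def pvWitness_rabbit_total : Int × Int := (5, 3)

def Spec_rabbit_total (month : Int) (ratio : Int) (out : Int) : Prop := out = rabbit_total_alt month ratio
instance (month : Int) (ratio : Int) (out : Int) : Decidable (Spec_rabbit_total month ratio out) := by unfold Spec_rabbit_total; infer_instance

-- ===== CLAIM (what is proved, stated in full; the proofs are below) =====
def Claim_equal_rabbit_total : Prop := ∀ (month : Int) (ratio : Int), Dom_rabbit_total month ratio → Pre_rabbit_total month ratio → Spec_rabbit_total month ratio (rabbit_total month ratio)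
-- ===== LEMMAS AND PROOFS =====

-- a foldl whose function ignores the elements is an iterate of the step
lemma foldl_ignore_iterate {α β : Type} (f : α → α) :
    ∀ (xs : List β) (a : α), xs.foldl (fun a _ => f a) a = f^[xs.length] a := by
  intro xs
  induction xs with
  | nil => intro a; rfl
  | cons x xs ih =>
      intro a
      simp [List.foldl_cons, ih, Function.iterate_succ_apply]

-- loop invariant: after k steps the pair holds (rabbitRecA (k+1), rabbitRecA (k+2))
lemma iterate_invariant (r : Int) :
    ∀ k : Nat, (fun (ab : Int × Int) => (ab.2, ab.2 + ab.1 * r))^[k] (1, 1)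
      = (rabbitRecA (k+1) r, rabbitRecA (k+2) r) := by
  intro k
  induction k with
  | zero => simp [rabbitRecA]
  | succ k ih =>
      rw [Function.iterate_succ_apply', ih]
      show (rabbitRecA (k+2) r, rabbitRecA (k+2) r + rabbitRecA (k+1) r * r)
        = (rabbitRecA (k+1+1) r, rabbitRecA (k+1+2) r)
      rw [show k+1+2 = k+3 from rfl, show rabbitRecA (k+3) r = rabbitRecA (k+2) r + rabbitRecA (k+1) r * r from rfl]

-- ===== VERDICT (by name: the statement is the Claim_ definition above) =====
theorem rabbit_total_spec : Claim_equal_rabbit_total := by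
  intro month ratio _ hpre
  unfold Spec_rabbit_total rabbit_total rabbit_total_alt
  rw [foldl_ignore_iterate, PySem.List.length_pyRange_one, iterate_invariant]
  have hpre' : (1:Int) ≤ month := hpre
  have h1 : (1:Nat) ≤ month.toNat := by omega
  rcases Nat.lt_or_ge month.toNat 2 with h2 | h2
  · -- month = 1
    have : month.toNat = 1 := by omega
    have hm : month = 1 := by omega
    subst hm
    simp [rabbitRecA]
  · -- month ≥ 2
    rw [show (month - 2 - 0) = month - 2 by ring,
       show (month - 2).toNat + 2 = month.toNat by omega]
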